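-- pv_equiv track=rewrite | github.com/KevinWMW/Interpreter-made-in-an-interpreter | Basic Interpreter/lexer.py | reformat_brackets
-- ===== SOURCE A (Python) =====
-- def reformat_brackets(query) -> str:
--     new_query = ''
--     for char in query:
--
--         if char == ')':
--             new_query += " "
--
--         new_query += char
--         if char == '(':
--             new_query += " "
--
--     return new_query
-- ===== SOURCE B (Python) =====
-- def reformat_brackets(query) -> str:
--     return query.replace('(', '( ').replace(')', ' )')
-- ===== Notes on version B (the rewrite author's own statement) =====
-- stated objective: idiomatic
-- what changed: Replaces the per-character accumulation loop with two whole-string substitutions: '(' -> '( ' and ')' -> ' )'; order-independent since the inserted spaces are never parentheses.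
import Mathlib
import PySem

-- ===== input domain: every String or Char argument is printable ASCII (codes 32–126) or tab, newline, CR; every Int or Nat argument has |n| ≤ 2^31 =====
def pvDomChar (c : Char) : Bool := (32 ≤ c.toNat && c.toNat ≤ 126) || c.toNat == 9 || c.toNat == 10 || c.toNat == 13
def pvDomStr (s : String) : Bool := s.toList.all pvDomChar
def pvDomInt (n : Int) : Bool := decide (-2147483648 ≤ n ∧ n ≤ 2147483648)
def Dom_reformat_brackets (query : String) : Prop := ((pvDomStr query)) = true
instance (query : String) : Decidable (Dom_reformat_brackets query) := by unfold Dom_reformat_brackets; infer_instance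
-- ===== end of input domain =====

-- B replaces A's per-character accumulation loop with two whole-string substitutions
-- ('(' -> '( ', ')' -> ' )'); objective: idiomatic.


-- ===== PORT A =====
def reformat_brackets (query : String) : String :=
  query.toList.foldl (fun new_query char =>
    let new_query := if char = ')' then new_query ++ " " else new_query
    let new_query := new_query ++ String.ofList [char]
    if char = '(' then new_query ++ " " else new_query) ""

-- ===== PORT B =====
def reformat_brackets_alt (query : String) : String :=
  PySem.Str.replace (PySem.Str.replace query "(" "( ") ")" " )"

-- ===== PRECONDITION & SPEC =====
def Spec_reformat_brackets (query : String) (out : String) : Prop := out = reformat_brackets_alt query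
instance (query : String) (out : String) : Decidable (Spec_reformat_brackets query out) := by unfold Spec_reformat_brackets; infer_instance

-- ===== CLAIM (what is proved, stated in full; the proofs are below) =====
def Claim_equal_reformat_brackets : Prop := ∀ (query : String), Dom_reformat_brackets query → Spec_reformat_brackets query (reformat_brackets query)

-- ===== LEMMAS AND PROOFS =====

-- per-character expansion of A
def pvF (c : Char) : List Char :=
  (if c = ')' then [' '] else []) ++ [c] ++ (if c = '(' then [' '] else [])

lemma pvFoldA (l : List Char) (s : String) :
    (l.foldl (fun new_query char =>
      let new_query := if char = ')' then new_query ++ " " else new_query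
      let new_query := new_query ++ String.ofList [char]
      if char = '(' then new_query ++ " " else new_query) s).toList
    = s.toList ++ l.flatMap pvF := by
  induction l generalizing s with
  | nil => simp
  | cons c t ih =>
    simp only [List.foldl_cons, List.flatMap_cons, ih, pvF]
    by_cases h1 : c = ')' <;> by_cases h2 : c = '(' <;>
      simp_all [String.toList_append, String.toList_ofList]

-- replace with a single-char pattern is a flatMap
lemma pvGoSingle (o : Char) (new : List Char) :
    ∀ (fuel : Nat) (l acc : List Char), l.length ≤ fuel →
      PySem.Chars.replace.go [o] new fuel l acc
        = acc.reverse ++ l.flatMap (fun c => if c = o then new else [c]) := by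
  intro fuel
  induction fuel with
  | zero =>
    intro l acc h
    have : l = [] := List.eq_nil_of_length_eq_zero (Nat.le_zero.mp h)
    subst this; simp [PySem.Chars.replace.go]
  | succ n ih =>
    intro l acc h
    cases l with
    | nil => simp [PySem.Chars.replace.go]
    | cons c t =>
      simp only [PySem.Chars.replace.go]
      by_cases hc : c = o
      · have hp : List.isPrefixOf [o] (c :: t) = true := by
          simp [List.isPrefixOf, hc]
        simp only [hp, if_pos]
        rw [show List.drop [o].length (c :: t) = t from rfl]
        rw [ih t _ (by simp at h ⊢; omega)]
        simp [hc]
      · have hp : List.isPrefixOf [o] (c :: t) = false := by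
          simp [List.isPrefixOf]; exact fun h' => hc h'.symm
        simp only [hp, Bool.false_eq_true, if_false]
        rw [ih t (c :: acc) (by simp at h ⊢; omega)]
        simp [hc]

lemma pvReplaceSingle (s : List Char) (o : Char) (new : List Char) :
    PySem.Chars.replace s [o] new = s.flatMap (fun c => if c = o then new else [c]) := by
  unfold PySem.Chars.replace
  rw [if_neg (by simp)]
  exact pvGoSingle o new s.length s [] le_rfl

-- composing the two substitutions gives A's per-character expansion
lemma pvCompose (l : List Char) :
    (l.flatMap (fun c => if c = '(' then ['(', ' '] else [c])).flatMap
      (fun c => if c = ')' then [' ', ')'] else [c]) = l.flatMap pvF := by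
  induction l with
  | nil => rfl
  | cons c t ih =>
    simp only [List.flatMap_cons, List.flatMap_append, ih, pvF]
    by_cases h1 : c = '(' <;> by_cases h2 : c = ')' <;> simp_all

-- ===== VERDICT (by name: the statement is the Claim_ definition above) =====
theorem reformat_brackets_spec : Claim_equal_reformat_brackets := by
  intro query _
  unfold Spec_reformat_brackets reformat_brackets reformat_brackets_alt
  apply String.toList_inj.mp
  rw [pvFoldA]
  simp only [PySem.Str.toList_replace]
  have h1 : "(".toList = ['('] := rfl
  have h2 : ")".toList = [')'] := rfl
  have h3 : "( ".toList = ['(', ' '] := rfl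
  have h4 : " )".toList = [' ', ')'] := rfl
  rw [h1, h2, h3, h4, pvReplaceSingle, pvReplaceSingle]
  simpa using (pvCompose query.toList).symm
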